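-- pv_equiv track=rewrite | github.com/betterzian/PrivacyGuard | privacyguard/infrastructure/pii/rule_based_detector.py | _previous_significant_char
-- ===== SOURCE A (Python) =====
-- _NAME_MATCH_IGNORABLE = set(" \t\r\n\f\v\u3000·•・")
--
-- def _previous_significant_char(raw_text: str, end: int) -> str | None:
--     index = min(end, len(raw_text)) - 1
--     while index >= 0:
--         current = raw_text[index]
--         if current in _NAME_MATCH_IGNORABLE:
--             index -= 1
--             continue
--         return current
--     return None
-- ===== SOURCE B (Python) =====
-- _NAME_MATCH_IGNORABLE = set(" \t\r\n\f\v\u3000·•・")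
--
-- def _previous_significant_char(raw_text: str, end: int) -> str | None:
--     clamp = max(0, min(end, len(raw_text)))
--     trimmed = raw_text[:clamp].rstrip("".join(_NAME_MATCH_IGNORABLE))
--     return trimmed[-1] if trimmed else None
-- ===== Notes on version B (the rewrite author's own statement) =====
-- stated objective: simpler
-- what changed: Replaces the explicit backward index-scanning while-loop with a clamp / slice / rstrip / last-char pipeline.
import Mathlib
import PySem

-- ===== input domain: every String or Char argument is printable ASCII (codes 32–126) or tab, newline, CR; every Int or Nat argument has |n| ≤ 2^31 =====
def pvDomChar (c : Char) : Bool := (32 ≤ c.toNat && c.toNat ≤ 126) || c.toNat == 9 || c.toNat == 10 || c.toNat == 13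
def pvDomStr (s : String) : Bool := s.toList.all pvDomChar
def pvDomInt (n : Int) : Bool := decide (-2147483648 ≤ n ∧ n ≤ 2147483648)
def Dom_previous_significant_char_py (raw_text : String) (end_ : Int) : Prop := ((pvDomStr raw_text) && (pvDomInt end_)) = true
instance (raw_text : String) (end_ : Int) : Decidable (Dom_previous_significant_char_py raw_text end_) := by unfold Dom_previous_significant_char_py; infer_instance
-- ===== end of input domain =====

-- B replaces A's explicit backward index-scanning loop with a clamp / prefix / strip-trailing-ignorables / last-char pipeline (simpler decomposition; same cost).

-- the shared module constant _NAME_MATCH_IGNORABLE (a set of characters)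
def pvIgnorable : List Char :=
  [' ', '\t', '\r', '\n', Char.ofNat 12, Char.ofNat 11, Char.ofNat 0x3000,
   Char.ofNat 0xB7, Char.ofNat 0x2022, Char.ofNat 0x30FB]

def pvIsIgnorable (c : Char) : Bool := pvIgnorable.contains c

-- ===== PORT A =====
-- A's while-loop, stepping the index downward; n is the current index (always < cs.length).
def pvLoopA (cs : List Char) (n : Nat) : Option String :=
    match cs[n]? with
    | none => none
    | some c =>
      if pvIsIgnorable c then
        match n with
        | 0 => none
        | m + 1 => pvLoopA cs m
      else some (String.ofList [c])
termination_by n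

def previous_significant_char_py (raw_text : String) (end_ : Int) : Option String :=
  let cs := raw_text.toList
  let index : Int := min end_ (cs.length : Int) - 1
  if 0 ≤ index then pvLoopA cs index.toNat else none

-- ===== PORT B =====
def previous_significant_char_py_alt (raw_text : String) (end_ : Int) : Option String :=
  let cs := raw_text.toList
  let clamp : Int := max 0 (min end_ (cs.length : Int))
  let trimmed := ((cs.take clamp.toNat).reverse.dropWhile pvIsIgnorable).reverse
  trimmed.getLast?.map (fun c => String.ofList [c])

-- ===== PRECONDITION & SPEC =====
def Spec_previous_significant_char_py (raw_text : String) (end_ : Int) (out : Option String) : Prop := out = previous_significant_char_py_alt raw_text end_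
instance (raw_text : String) (end_ : Int) (out : Option String) : Decidable (Spec_previous_significant_char_py raw_text end_ out) := by unfold Spec_previous_significant_char_py; infer_instance

-- ===== CLAIM (what is proved, stated in full; the proofs are below) =====
def Claim_equal_previous_significant_char_py : Prop := ∀ (raw_text : String) (end_ : Int), Dom_previous_significant_char_py raw_text end_ → Spec_previous_significant_char_py raw_text end_ (previous_significant_char_py raw_text end_)

-- ===== LEMMAS AND PROOFS =====

theorem pvGetLast?_reverse {α : Type} (l : List α) : l.reverse.getLast? = l.head? := by
  cases l with
  | nil => rfl
  | cons a t => simp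

-- A's loop equals: head of (first n+1 chars, reversed, ignorables dropped)
theorem pvLoopA_eq (cs : List Char) (n : Nat) (hn : n < cs.length) :
    pvLoopA cs n = ((cs.take (n + 1)).reverse.dropWhile pvIsIgnorable).head?.map
      (fun c => String.ofList [c]) := by
  induction n with
  | zero =>
    have : cs.take 1 = [cs[0]] := by
      cases cs with
      | nil => simp at hn
      | cons a t => simp
    rw [pvLoopA, this]
    simp only [List.getElem?_eq_getElem hn, List.reverse_singleton, List.dropWhile]
    split_ifs with h <;> simp [h]
  | succ m ih =>
    have hm : m < cs.length := Nat.lt_of_succ_lt hn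
    have htake : cs.take (m + 2) = cs.take (m + 1) ++ [cs[m + 1]] :=
      List.take_succ_eq_append_getElem hn
    rw [pvLoopA, htake]
    simp only [List.getElem?_eq_getElem hn, List.reverse_append, List.reverse_singleton,
      List.singleton_append, List.dropWhile]
    split_ifs with h
    · simp only [h]
      exact ih hm
    · simp [h]

theorem previous_significant_char_py_eq_alt (raw_text : String) (end_ : Int) :
    previous_significant_char_py raw_text end_ = previous_significant_char_py_alt raw_text end_ := by
  unfold previous_significant_char_py previous_significant_char_py_alt
  set cs := raw_text.toList with hcs
  simp only
  rw [pvGetLast?_reverse]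
  by_cases h : 0 ≤ min end_ (cs.length : Int) - 1
  · rw [if_pos h]
    have hmin : min end_ (cs.length : Int) ≤ (cs.length : Int) := min_le_right _ _
    have hclamp : max 0 (min end_ (cs.length : Int)) = min end_ (cs.length : Int) :=
      max_eq_right (by omega)
    rw [hclamp]
    have h1 : (min end_ (cs.length : Int)).toNat = (min end_ (cs.length : Int) - 1).toNat + 1 := by
      omega
    have h2 : (min end_ (cs.length : Int) - 1).toNat < cs.length := by omega
    rw [h1, pvLoopA_eq cs _ h2]
  · rw [if_neg h]
    have hclamp : max 0 (min end_ (cs.length : Int)) = 0 := max_eq_left (by omega)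
    rw [hclamp]
    simp

-- ===== VERDICT (by name: the statement is the Claim_ definition above) =====
theorem previous_significant_char_py_spec : Claim_equal_previous_significant_char_py := by
  intro raw_text end_ _
  unfold Spec_previous_significant_char_py
  exact previous_significant_char_py_eq_alt raw_text end_
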